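-- pv_equiv track=rewrite | github.com/namelessgamingco/poker-tracker | engine.py | _parse_board_cards
-- ===== SOURCE A (Python) =====
-- RANK_VALUES = {"A":14,"K":13,"Q":12,"J":11,"T":10,"9":9,"8":8,"7":7,"6":6,"5":5,"4":4,"3":3,"2":2}
--
-- def _parse_board_cards(board: str) -> list:
--     """Parse board string into list of (rank, suit) tuples.
--     Handles formats: '7cJcQdKdTd', '7c Jc Qd Kd Td', 'Kh7c2d'
--     """
--     if not board:
--         return []
--     board = board.strip().replace(" ", "")
--     cards = []
--     i = 0
--     while i < len(board) - 1:
--         rank = board[i].upper()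
--         suit = board[i+1].lower()
--         if rank in RANK_VALUES and suit in "hdcs":
--             cards.append((rank, suit))
--             i += 2
--         else:
--             i += 1
--     return cards
-- ===== SOURCE B (Python) =====
-- RANK_VALUES = {"A":14,"K":13,"Q":12,"J":11,"T":10,"9":9,"8":8,"7":7,"6":6,"5":5,"4":4,"3":3,"2":2}
--
-- def _parse_board_cards(board: str) -> list:
--     """Parse board string into list of (rank, suit) tuples (single state-machine pass)."""
--     if not board:
--         return []
--     cards = []
--     pending = None  # an uppercased rank char waiting for its suit
--     for ch in board.strip().replace(" ", ""):
--         if pending is not None and ch.lower() in "hdcs":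
--             cards.append((pending, ch.lower()))
--             pending = None
--         elif ch.upper() in RANK_VALUES:
--             pending = ch.upper()
--         else:
--             pending = None
--     return cards
-- ===== Notes on version B (the rewrite author's own statement) =====
-- stated objective: alternative
-- what changed: Replaces A's index-arithmetic while-loop (advance 2 on a rank+suit match, 1 on mismatch, stopping before the last char) with a single for-each-character fold carrying a pending-rank state that emits a pair when a suit follows a stored rank.
import Mathlib
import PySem

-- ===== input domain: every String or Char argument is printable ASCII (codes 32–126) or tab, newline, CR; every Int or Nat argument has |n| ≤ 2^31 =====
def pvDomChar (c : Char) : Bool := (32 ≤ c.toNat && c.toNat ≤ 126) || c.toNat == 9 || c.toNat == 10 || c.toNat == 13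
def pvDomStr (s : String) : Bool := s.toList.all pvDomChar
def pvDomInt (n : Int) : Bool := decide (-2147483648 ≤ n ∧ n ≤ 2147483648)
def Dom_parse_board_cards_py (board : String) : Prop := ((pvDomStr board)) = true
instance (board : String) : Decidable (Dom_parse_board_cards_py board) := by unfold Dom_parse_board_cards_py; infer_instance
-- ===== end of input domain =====

-- B replaces A's index-arithmetic while-loop (advance by 2 on match, 1 on mismatch) by a single
-- left fold over the characters carrying a pending-rank state; same return value, no speed claim.

-- ===== PORT A =====
-- the keys of RANK_VALUES (only membership of a 1-char string is ever tested)
def pvRankChars : List Char := ['A','K','Q','J','T','9','8','7','6','5','4','3','2']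
-- the suit string "hdcs" (membership of a 1-char string = membership of the char)
def pvSuitChars : List Char := ['h','d','c','s']

-- A's while-loop: 'i < len(board) - 1' ⟺ at least two chars remain; 'i += 2' drops both,
-- 'i += 1' drops one — transliterated as recursion over the remaining character list.
def parseBoardLoopA : List Char → List (String × String)
  | [] => []
  | [_] => []
  | c1 :: c2 :: rest =>
    let rank := PySem.Chars.upperChar c1
    let suit := PySem.Chars.lowerChar c2
    if pvRankChars.contains rank && pvSuitChars.contains suit then
      (String.mk [rank], String.mk [suit]) :: parseBoardLoopA rest
    else
      parseBoardLoopA (c2 :: rest)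

def parse_board_cards_py (board : String) : List (String × String) :=
  if board = "" then []
  else parseBoardLoopA ((PySem.Str.replace (PySem.Str.strip board) " " "").toList)

-- ===== PORT B =====
-- Source B's loop body: state = (cards so far, pending uppercased rank char or none)
def parseBoardStepB (st : List (String × String) × Option Char) (ch : Char) :
    List (String × String) × Option Char :=
  match st.2 with
  | some r =>
    if pvSuitChars.contains (PySem.Chars.lowerChar ch) then
      (st.1 ++ [(String.mk [r], String.mk [PySem.Chars.lowerChar ch])], none)
    else if pvRankChars.contains (PySem.Chars.upperChar ch) then
      (st.1, some (PySem.Chars.upperChar ch))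
    else (st.1, none)
  | none =>
    if pvRankChars.contains (PySem.Chars.upperChar ch) then
      (st.1, some (PySem.Chars.upperChar ch))
    else (st.1, none)

def parse_board_cards_py_alt (board : String) : List (String × String) :=
  if board = "" then []
  else (((PySem.Str.replace (PySem.Str.strip board) " " "").toList).foldl
          parseBoardStepB ([], none)).1

-- ===== PRECONDITION & SPEC =====
def Spec_parse_board_cards_py (board : String) (out : List (String × String)) : Prop := out = parse_board_cards_py_alt board
instance (board : String) (out : List (String × String)) : Decidable (Spec_parse_board_cards_py board out) := by unfold Spec_parse_board_cards_py; infer_instance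

-- ===== CLAIM (what is proved, stated in full; the proofs are below) =====
def Claim_equal_parse_board_cards_py : Prop := ∀ (board : String), Dom_parse_board_cards_py board → Spec_parse_board_cards_py board (parse_board_cards_py board)

-- ===== LEMMAS AND PROOFS =====

-- reference function: the pairs emitted by the state machine started with pending state p
def pvEmit : Option Char → List Char → List (String × String)
  | _, [] => []
  | some r, c :: cs =>
    if pvSuitChars.contains (PySem.Chars.lowerChar c) then
      (String.mk [r], String.mk [PySem.Chars.lowerChar c]) :: pvEmit none cs
    else if pvRankChars.contains (PySem.Chars.upperChar c) then
      pvEmit (some (PySem.Chars.upperChar c)) cs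
    else pvEmit none cs
  | none, c :: cs =>
    if pvRankChars.contains (PySem.Chars.upperChar c) then
      pvEmit (some (PySem.Chars.upperChar c)) cs
    else pvEmit none cs

lemma foldB_eq_emit (cs : List Char) :
    ∀ (acc : List (String × String)) (p : Option Char),
      (cs.foldl parseBoardStepB (acc, p)).1 = acc ++ pvEmit p cs := by
  induction cs with
  | nil => intro acc p; simp [pvEmit]
  | cons c cs ih =>
    intro acc p
    cases p with
    | none =>
      by_cases hr : PySem.Chars.upperChar c ∈ pvRankChars <;>
        simp [List.foldl, parseBoardStepB, pvEmit, hr, ih]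
    | some r =>
      by_cases hs : PySem.Chars.lowerChar c ∈ pvSuitChars
      · simp [List.foldl, parseBoardStepB, pvEmit, hs, ih]
      · by_cases hr : PySem.Chars.upperChar c ∈ pvRankChars <;>
          simp [List.foldl, parseBoardStepB, pvEmit, hs, hr, ih]

lemma loopA_eq_emit (cs : List Char) : parseBoardLoopA cs = pvEmit none cs := by
  induction cs using parseBoardLoopA.induct with
  | case1 => simp [parseBoardLoopA, pvEmit]
  | case2 c =>
    by_cases hr : PySem.Chars.upperChar c ∈ pvRankChars <;>
      simp [parseBoardLoopA, pvEmit, hr]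
  | case3 c1 c2 rest rank suit hcond ih =>
    -- matching branch: c1 is a rank and c2 a suit
    simp only [rank, suit, Bool.and_eq_true, List.contains_iff_mem] at hcond
    simp [parseBoardLoopA, pvEmit, hcond.1, hcond.2, ih]
  | case4 c1 c2 rest rank suit hcond ih =>
    simp only [rank, suit, Bool.and_eq_true, List.contains_iff_mem, not_and] at hcond
    by_cases hr : PySem.Chars.upperChar c1 ∈ pvRankChars
    · have hs := hcond hr
      have ih' := ih
      simp only [pvEmit] at ih'
      simp [parseBoardLoopA, pvEmit, hr, hs, ih']
    · simp [parseBoardLoopA, pvEmit, hr, ih]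

-- ===== VERDICT (by name: the statement is the Claim_ definition above) =====
theorem parse_board_cards_py_spec : Claim_equal_parse_board_cards_py := by
  intro board _
  unfold Spec_parse_board_cards_py parse_board_cards_py parse_board_cards_py_alt
  by_cases h : board = ""
  · simp [h]
  · simp [h, foldB_eq_emit, loopA_eq_emit]
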